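-- pv_equiv track=rewrite | github.com/daniel-reich/ubiquitous-fiesta | bPzBa5JKvb6XFyKMs_14.py | get_primiera_score
-- ===== SOURCE A (Python) =====
-- def get_primiera_score(deck):
--     card_points = {'A': 16, '6': 18, '7': 21,
--                    '2': 12,'3': 13, '4': 14, '5': 15,
--                    'J': 10, 'Q': 10, 'K': 10}
--     suits = ('d', 'h', 's', 'c')
--     pts = [[card_points.get(card[0], 0) for card in deck if card[1] == suit] for suit in suits]
--     if all([len(suit_pts) > 0 for suit_pts in pts]):
--         return sum([max(suit_pts) for suit_pts in pts])
--     return 0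
-- ===== SOURCE B (Python) =====
-- def get_primiera_score(deck):
--     card_points = {'A': 16, '6': 18, '7': 21,
--                    '2': 12, '3': 13, '4': 14, '5': 15,
--                    'J': 10, 'Q': 10, 'K': 10}
--     best_d = best_h = best_s = best_c = None
--     for card in deck:
--         suit = card[1]
--         p = card_points.get(card[0], 0)
--         if suit == 'd':
--             if best_d is None or p > best_d:
--                 best_d = p
--         elif suit == 'h':
--             if best_h is None or p > best_h:
--                 best_h = p
--         elif suit == 's':
--             if best_s is None or p > best_s:
--                 best_s = p
--         elif suit == 'c':
--             if best_c is None or p > best_c: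
--                 best_c = p
--     if best_d is None or best_h is None or best_s is None or best_c is None:
--         return 0
--     return best_d + best_h + best_s + best_c
-- ===== Notes on version B (the rewrite author's own statement) =====
-- stated objective: alternative
-- what changed: Replaces the four filtered passes with intermediate per-suit point lists plus per-suit max and sum by a single pass over the deck maintaining one running-maximum accumulator per suit.
import Mathlib
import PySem

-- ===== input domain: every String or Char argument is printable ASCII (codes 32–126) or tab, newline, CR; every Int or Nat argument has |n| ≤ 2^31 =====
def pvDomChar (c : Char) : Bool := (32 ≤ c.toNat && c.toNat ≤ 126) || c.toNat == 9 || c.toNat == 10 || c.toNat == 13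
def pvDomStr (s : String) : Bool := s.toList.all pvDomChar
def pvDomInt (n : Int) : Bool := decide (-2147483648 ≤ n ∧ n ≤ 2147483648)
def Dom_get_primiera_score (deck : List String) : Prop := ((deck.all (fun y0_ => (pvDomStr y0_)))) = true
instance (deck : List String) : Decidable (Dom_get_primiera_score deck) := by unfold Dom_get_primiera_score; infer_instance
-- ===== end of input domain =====

-- B replaces A's four filtered passes (per-suit point lists, then max and sum) by a single pass
-- keeping one running per-suit maximum (alternative decomposition; similar cost).

-- card[i] for i = 0, 1; Pre_ guarantees the index is in range, the default is never used there
def pvCardChar (s : String) (i : Int) : Char := (PySem.Str.pyGet? s i).getD ' '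

-- card_points.get(c, 0) — the literal dict of both sources
def cardPts (c : Char) : Int :=
  if c = 'A' then 16 else if c = '6' then 18 else if c = '7' then 21
  else if c = '2' then 12 else if c = '3' then 13 else if c = '4' then 14
  else if c = '5' then 15 else if c = 'J' then 10 else if c = 'Q' then 10
  else if c = 'K' then 10 else 0

-- ===== PORT A =====
def get_primiera_score (deck : List String) : Int :=
  let pts := ['d', 'h', 's', 'c'].map (fun suit =>
    (deck.filter (fun card => pvCardChar card 1 == suit)).map
      (fun card => cardPts (pvCardChar card 0)))
  if pts.all (fun suit_pts => decide (suit_pts.length > 0)) then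
    (pts.map (fun suit_pts => (PySem.List.max? suit_pts (fun y => y)).getD 0)).foldl (· + ·) 0
  else 0

-- ===== PORT B =====
def pvBump (o : Option Int) (p : Int) : Option Int :=
  match o with
  | none => some p
  | some q => if p > q then some p else some q

def pvStep (acc : Option Int × Option Int × Option Int × Option Int) (card : String) :
    Option Int × Option Int × Option Int × Option Int :=
  let suit := pvCardChar card 1
  let p := cardPts (pvCardChar card 0)
  if suit = 'd' then (pvBump acc.1 p, acc.2.1, acc.2.2.1, acc.2.2.2)
  else if suit = 'h' then (acc.1, pvBump acc.2.1 p, acc.2.2.1, acc.2.2.2)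
  else if suit = 's' then (acc.1, acc.2.1, pvBump acc.2.2.1 p, acc.2.2.2)
  else if suit = 'c' then (acc.1, acc.2.1, acc.2.2.1, pvBump acc.2.2.2 p)
  else acc

def get_primiera_score_alt (deck : List String) : Int :=
  match deck.foldl pvStep (none, none, none, none) with
  | (some bd, some bh, some bs, some bc) => bd + bh + bs + bc
  | _ => 0

-- ===== PRECONDITION & SPEC =====
-- Pre_ excludes exactly the decks containing a card string of length < 2, on which Python A
-- raises IndexError at card[1].
def Pre_get_primiera_score (deck : List String) : Prop :=
  ∀ card ∈ deck, 2 ≤ card.toList.length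
instance (deck : List String) : Decidable (Pre_get_primiera_score deck) := by
  unfold Pre_get_primiera_score; infer_instance

def pvWitness_get_primiera_score : List String := ["Ad", "7h", "2s", "Kc", "9d"]

def Spec_get_primiera_score (deck : List String) (out : Int) : Prop := out = get_primiera_score_alt deck
instance (deck : List String) (out : Int) : Decidable (Spec_get_primiera_score deck out) := by unfold Spec_get_primiera_score; infer_instance

-- ===== CLAIM (what is proved, stated in full; the proofs are below) =====
def Claim_equal_get_primiera_score : Prop := ∀ (deck : List String), Dom_get_primiera_score deck → Pre_get_primiera_score deck → Spec_get_primiera_score deck (get_primiera_score deck)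

-- ===== LEMMAS AND PROOFS =====

-- the per-suit restriction of B's one-pass fold
def pvSuitFold (suit : Char) (deck : List String) (o : Option Int) : Option Int :=
  deck.foldl
    (fun o card => if pvCardChar card 1 = suit then pvBump o (cardPts (pvCardChar card 0)) else o) o

theorem foldl_step_eq (deck : List String)
    (d h s c : Option Int) :
    deck.foldl pvStep (d, h, s, c) =
      (pvSuitFold 'd' deck d, pvSuitFold 'h' deck h, pvSuitFold 's' deck s, pvSuitFold 'c' deck c) := by
  induction deck generalizing d h s c with
  | nil => rfl
  | cons card t ih =>
    by_cases h1 : pvCardChar card 1 = 'd'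
    · simp [pvStep, pvSuitFold, h1, List.foldl_cons, ih]
    · by_cases h2 : pvCardChar card 1 = 'h'
      · simp [pvStep, pvSuitFold, h2, List.foldl_cons, ih]
      · by_cases h3 : pvCardChar card 1 = 's'
        · simp [pvStep, pvSuitFold, h3, List.foldl_cons, ih]
        · by_cases h4 : pvCardChar card 1 = 'c'
          · simp [pvStep, pvSuitFold, h4, List.foldl_cons, ih]
          · simp [pvStep, pvSuitFold, h1, h2, h3, h4, List.foldl_cons, ih]

theorem suitFold_eq_foldl (suit : Char) (deck : List String) (o : Option Int) :
    pvSuitFold suit deck o =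
      ((deck.filter (fun card => pvCardChar card 1 == suit)).map
        (fun card => cardPts (pvCardChar card 0))).foldl pvBump o := by
  induction deck generalizing o with
  | nil => rfl
  | cons card t ih =>
    by_cases hc : pvCardChar card 1 = suit
    · simp [pvSuitFold, List.foldl_cons, hc] at *
      exact ih _
    · simp only [pvSuitFold, List.foldl_cons, List.filter_cons] at *
      simp [hc, ih]

theorem foldl_bump_some (t : List Int) (x : Int) :
    t.foldl pvBump (some x) = some (t.foldl max x) := by
  induction t generalizing x with
  | nil => rfl
  | cons y t ih =>
    simp only [List.foldl_cons]
    have : pvBump (some x) y = some (max x y) := by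
      simp only [pvBump]
      split_ifs with h
      · simp [max_def]; omega
      · simp [max_def]; omega
    rw [this, ih]

theorem foldl_bump_none (L : List Int) :
    L.foldl pvBump none = PySem.List.max? L (fun y => y) := by
  cases L with
  | nil => rfl
  | cons x t =>
    rw [PySem.List.max?_id_cons]
    simpa using foldl_bump_some t x

-- ===== VERDICT (by name: the statement is the Claim_ definition above) =====
theorem get_primiera_score_spec : Claim_equal_get_primiera_score := by
  intro deck _ _
  unfold Spec_get_primiera_score get_primiera_score get_primiera_score_alt
  rw [foldl_step_eq]
  simp only [suitFold_eq_foldl, foldl_bump_none, List.map_cons, List.map_nil, List.all_cons,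
    List.all_nil, List.foldl_cons, List.foldl_nil]
  set Ld := (deck.filter (fun card => pvCardChar card 1 == 'd')).map
      (fun card => cardPts (pvCardChar card 0)) with hLd
  set Lh := (deck.filter (fun card => pvCardChar card 1 == 'h')).map
      (fun card => cardPts (pvCardChar card 0)) with hLh
  set Ls := (deck.filter (fun card => pvCardChar card 1 == 's')).map
      (fun card => cardPts (pvCardChar card 0)) with hLs
  set Lc := (deck.filter (fun card => pvCardChar card 1 == 'c')).map
      (fun card => cardPts (pvCardChar card 0)) with hLc
  rcases hd : PySem.List.max? Ld (fun y => y) with _ | md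
  · have : Ld = [] := (PySem.List.max?_eq_none_iff _ _).1 hd
    simp [this]
  · rcases hh : PySem.List.max? Lh (fun y => y) with _ | mh
    · have : Lh = [] := (PySem.List.max?_eq_none_iff _ _).1 hh
      simp [this]
    · rcases hs : PySem.List.max? Ls (fun y => y) with _ | ms
      · have : Ls = [] := (PySem.List.max?_eq_none_iff _ _).1 hs
        simp [this]
      · rcases hc : PySem.List.max? Lc (fun y => y) with _ | mc
        · have : Lc = [] := (PySem.List.max?_eq_none_iff _ _).1 hc
          simp [this]
        · have hd' : Ld ≠ [] := by
            intro h
            rw [h, (PySem.List.max?_eq_none_iff ([] : List Int) (fun y => y)).2 rfl] at hd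
            cases hd
          have hh' : Lh ≠ [] := by
            intro h
            rw [h, (PySem.List.max?_eq_none_iff ([] : List Int) (fun y => y)).2 rfl] at hh
            cases hh
          have hs' : Ls ≠ [] := by
            intro h
            rw [h, (PySem.List.max?_eq_none_iff ([] : List Int) (fun y => y)).2 rfl] at hs
            cases hs
          have hc' : Lc ≠ [] := by
            intro h
            rw [h, (PySem.List.max?_eq_none_iff ([] : List Int) (fun y => y)).2 rfl] at hc
            cases hc
          simp [List.length_pos_iff, hd', hh', hs', hc']
          try omega
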